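-- pv_equiv track=rewrite | github.com/sweettuse/pyaoc | leetcode/text_just.py | yield_words
-- ===== SOURCE A (Python) =====
-- from itertools import chain, repeat
--
-- def _get_spaces(regular_len, num_extra):
--     extras = chain(num_extra * ' ', repeat(''))
--     while True:
--         yield regular_len * ' ' + next(extras)
--
-- def _join_sentence(words, num_spaces) -> str:
--     num_gaps = len(words) - 1
--     if not num_gaps:
--         return words[0] + num_spaces * ' '
--
--     spaces = _get_spaces(*divmod(num_spaces, num_gaps))
--     res = []
--     for w in words:
--         res.append(w)
--         res.append(next(spaces))
--     res.pop()
--     return ''.join(res)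
--
-- def yield_words(words, max_width):
--     cur_words = []
--     cur_letters = 0
--
--
--     for l, w in zip(map(len, words), words):
--         next_letters = cur_letters + l
--         next_total = next_letters + len(cur_words)  # add in spaces
--
--         if next_total <= max_width:
--             cur_words.append(w)
--             cur_letters += l
--         else:
--             yield _join_sentence(cur_words, max_width - cur_letters)
--             cur_words = [w]
--             cur_letters = l
--
--     if cur_words:
--         res = ' '.join(cur_words)
--         yield res + (max_width - len(res)) * ' '
-- ===== SOURCE B (Python) =====
-- def yield_words(words, max_width):
--     ws = list(words)
--     n = len(ws)
--     # key[j] = (letters in ws[:j]) + j; strictly increasing, so the packing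
--     # cutoff "letters + gaps <= max_width" becomes key[j] <= key[i] + max_width + 1
--     key = [0] * (n + 1)
--     for i, w in enumerate(ws):
--         key[i + 1] = key[i] + len(w) + 1
--     i = 0
--     while i < n:
--         # largest j in [i+1, n] with key[j] <= key[i] + max_width + 1, by binary
--         # search (the predicate is monotone); j stays i+1 even for an over-long
--         # word, so every line holds at least one word
--         lo, hi = i + 1, n
--         while lo < hi:
--             mid = (lo + hi + 1) // 2
--             if key[mid] <= key[i] + max_width + 1:
--                 lo = mid
--             else:
--                 hi = mid - 1
--         j = lo
--         line = ws[i:j]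
--         if j == n:                      # final line: single spaces, right-pad
--             s = ' '.join(line)
--             yield s + ' ' * (max_width - len(s))
--         elif j == i + 1:                # single word: all spaces on the right
--             yield line[0] + ' ' * (max_width - len(line[0]))
--         else:                           # left-heavy gap distribution via divmod
--             gaps = j - i - 1
--             letters = key[j] - key[i] - (j - i)
--             base, extra = divmod(max_width - letters, gaps)
--             yield ''.join(
--                 w + ' ' * (base + (k < extra)) for k, w in enumerate(line[:-1])
--             ) + line[-1]
--         i = j
-- ===== Notes on version B (the rewrite author's own statement) =====
-- stated objective: alternative
-- what changed: A scans word by word, mutating a current-line accumulator and justifying each line lazily with an itertools space generator plus a pop; B precomputes a prefix-sum array key[j] = letters+j and finds each line break directly by binary search on the monotone cutoff key[j] <= key[i]+max_width+1, then emits each justified line from an explicit divmod gap formula.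
import Mathlib
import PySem

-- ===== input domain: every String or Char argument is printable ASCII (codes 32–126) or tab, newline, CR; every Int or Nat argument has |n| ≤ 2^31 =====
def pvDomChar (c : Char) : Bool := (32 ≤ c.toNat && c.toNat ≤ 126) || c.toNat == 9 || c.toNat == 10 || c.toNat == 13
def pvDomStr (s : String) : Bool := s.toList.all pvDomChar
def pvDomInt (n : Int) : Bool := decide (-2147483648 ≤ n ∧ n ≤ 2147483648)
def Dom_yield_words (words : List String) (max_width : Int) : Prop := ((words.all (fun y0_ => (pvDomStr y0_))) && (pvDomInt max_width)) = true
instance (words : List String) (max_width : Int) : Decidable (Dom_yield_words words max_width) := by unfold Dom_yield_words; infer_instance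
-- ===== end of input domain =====

-- B replaces A's word-by-word accumulator scan by a prefix-sum array over which each line
-- break is found directly by binary search; return-value equivalence proved on Pre_
-- (A raises IndexError when the first word alone exceeds max_width; B returns the line there).

-- n * ' '  (Python string repetition; negative count gives "")
def pvSpaces (n : Int) : String := String.ofList (List.replicate n.toNat ' ')

-- ===== PORT A =====
-- the space strings produced by the _get_spaces generator: call i yields reg*' ' plus one
-- extra ' ' while i < ext (chain(num_extra*' ', repeat('')))
def pvGapA (reg ext : Int) (i : Nat) : String :=
  pvSpaces reg ++ (if (i : Int) < ext then " " else "")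

-- the res-building loop of _join_sentence (res accumulator, i = number of next(spaces) calls)
def pvLoopJ (reg ext : Int) : List String → List String → Nat → List String
  | [], res, _ => res
  | w :: t, res, i => pvLoopJ reg ext t (res ++ [w, pvGapA reg ext i]) (i + 1)

-- _join_sentence(words, num_spaces)  (words = [] raises in Python: outside Pre_)
def pvJoinSentenceA (ws : List String) (numSpaces : Int) : String :=
  let numGaps : Int := (ws.length : Int) - 1
  if numGaps = 0 then ws.headD "" ++ pvSpaces numSpaces
  else
    let reg := PySem.Int.floordiv numSpaces numGaps
    let ext := PySem.Int.mod numSpaces numGaps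
    PySem.Str.join "" ((pvLoopJ reg ext ws [] 0).dropLast)

-- the for-loop of yield_words: state (cur_words, cur_letters, yielded-so-far)
def pvLoopA (mw : Int) : List String → List String → Int → List String → List String × Int × List String
  | [], cur, letters, out => (cur, letters, out)
  | w :: ws, cur, letters, out =>
    let l : Int := PySem.Str.len w
    let nextLetters := letters + l
    let nextTotal := nextLetters + (cur.length : Int)
    if nextTotal ≤ mw then pvLoopA mw ws (cur ++ [w]) nextLetters out
    else pvLoopA mw ws [w] l (out ++ [pvJoinSentenceA cur (mw - letters)])

-- the code after the loop: if cur_words: yield ' '.join(cur_words) + pad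
def pvFinishA (mw : Int) : List String × Int × List String → List String
  | (cur, _, out) =>
    if cur = [] then out
    else
      let res := PySem.Str.join " " cur
      out ++ [res ++ pvSpaces (mw - PySem.Str.len res)]

def yield_words (words : List String) (max_width : Int) : List String :=
  pvFinishA max_width (pvLoopA max_width words [] 0 [])

-- ===== PORT B =====
-- the key-building loop: key[i+1] = key[i] + len(w) + 1 (k carries key[i]); the full
-- array is 0 :: pvKeyB ws 0
def pvKeyB : List String → Int → List Int
  | [], _ => []
  | w :: t, k => (k + PySem.Str.len w + 1) :: pvKeyB t (k + PySem.Str.len w + 1)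

-- the inner while loop: rightmost j in [lo, hi] with key[j] <= bound (monotone
-- predicate); fuel = hi - lo bounds the iteration count (a totality guard only:
-- each step shrinks hi - lo, so the fuel never runs out)
def pvBSGo (key : List Int) (bound : Int) : Nat → Nat → Nat → Nat
  | 0, lo, _ => lo
  | fuel + 1, lo, hi =>
    if lo < hi then
      let mid := (lo + hi + 1) / 2
      if key.getD mid 0 ≤ bound then pvBSGo key bound fuel mid hi
      else pvBSGo key bound fuel lo (mid - 1)
    else lo

def pvBS (key : List Int) (bound : Int) (lo hi : Nat) : Nat :=
  pvBSGo key bound (hi - lo) lo hi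

-- the outer while loop of B: i jumps line by line to the binary-searched break j;
-- fuel = n - i bounds the iteration count (each line consumes at least one word)
def pvRunGo (mw : Int) (ws : List String) (key : List Int) (n : Nat) : Nat → Nat → List String → List String
  | 0, _, out => out
  | fuel + 1, i, out =>
    if i < n then
      let j := pvBS key (key.getD i 0 + mw + 1) (i + 1) n
      let line := PySem.List.slice ws (some (i : Int)) (some (j : Int))
      let s : String :=
        if j = n then
          let t := PySem.Str.join " " line
          t ++ pvSpaces (mw - PySem.Str.len t)
        else if j = i + 1 then
          line.headD "" ++ pvSpaces (mw - PySem.Str.len (line.headD ""))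
        else
          let gaps : Int := (j : Int) - (i : Int) - 1
          let letters : Int := key.getD j 0 - key.getD i 0 - ((j : Int) - (i : Int))
          let base := PySem.Int.floordiv (mw - letters) gaps
          let extra := PySem.Int.mod (mw - letters) gaps
          PySem.Str.join ""
            ((PySem.List.enumerate line.dropLast).map
              (fun p => p.2 ++ pvSpaces (base + (if p.1 < extra then (1 : Int) else 0))))
            ++ (line.getLast?.getD "")
      pvRunGo mw ws key n fuel j (out ++ [s])
    else out

def yield_words_alt (words : List String) (max_width : Int) : List String :=
  pvRunGo max_width words (0 :: pvKeyB words 0) words.length words.length 0 []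

-- ===== PRECONDITION & SPEC =====
-- Pre_ excludes only inputs where A raises IndexError ('pop from empty list'): a nonempty
-- words list whose FIRST word alone is longer than max_width.
def Pre_yield_words (words : List String) (max_width : Int) : Prop :=
  words = [] ∨ PySem.Str.len (words.headD "") ≤ max_width
instance (words : List String) (max_width : Int) : Decidable (Pre_yield_words words max_width) := by
  unfold Pre_yield_words; infer_instance

def pvWitness_yield_words : List String × Int := (["This", "is", "an", "example"], 10)

def Spec_yield_words (words : List String) (max_width : Int) (out : List String) : Prop := out = yield_words_alt words max_width
instance (words : List String) (max_width : Int) (out : List String) : Decidable (Spec_yield_words words max_width out) := by unfold Spec_yield_words; infer_instance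

-- ===== CLAIM (what is proved, stated in full; the proofs are below) =====
def Claim_equal_yield_words : Prop := ∀ (words : List String) (max_width : Int), Dom_yield_words words max_width → Pre_yield_words words max_width → Spec_yield_words words max_width (yield_words words max_width)


-- ===== LEMMAS AND PROOFS =====

-- ---- the common spec layer: prefix sums, the greedy break, the lines ----

-- kf ws j = (letters in ws[:j]) + j : what key[j] holds
def kf (ws : List String) (j : Nat) : Int := ((ws.take j).map PySem.Str.len).sum + j

-- the greedy scan for the next break: extend the line ending at m while the next word fits
def gNa (mw : Int) (ws : List String) (i : Nat) (m : Nat) : Nat :=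
  if m < ws.length ∧ kf ws (m + 1) ≤ kf ws i + mw + 1 then gNa mw ws i (m + 1) else m
termination_by ws.length - m
decreasing_by omega

-- the justified line for the word range [i, j) (written with B's branch expressions)
def lineStr (mw : Int) (ws : List String) (i j : Nat) : String :=
  let line := (ws.drop i).take (j - i)
  if j = ws.length then
    let t := PySem.Str.join " " line
    t ++ pvSpaces (mw - PySem.Str.len t)
  else if j = i + 1 then
    line.headD "" ++ pvSpaces (mw - PySem.Str.len (line.headD ""))
  else
    let gaps : Int := (j : Int) - (i : Int) - 1
    let letters : Int := kf ws j - kf ws i - ((j : Int) - (i : Int))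
    let base := PySem.Int.floordiv (mw - letters) gaps
    let extra := PySem.Int.mod (mw - letters) gaps
    PySem.Str.join ""
      ((PySem.List.enumerate line.dropLast).map
        (fun p => p.2 ++ pvSpaces (base + (if p.1 < extra then (1 : Int) else 0))))
      ++ (line.getLast?.getD "")

theorem gNa_ge (mw : Int) (ws : List String) (i m : Nat) : m ≤ gNa mw ws i m := by
  fun_induction gNa mw ws i m with
  | case1 m h ih => omega
  | case2 m h => omega

def linesFrom (mw : Int) (ws : List String) (i : Nat) : List String :=
  if h : i < ws.length then
    lineStr mw ws i (gNa mw ws i (i + 1)) :: linesFrom mw ws (gNa mw ws i (i + 1))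
  else []
termination_by ws.length - i
decreasing_by
  have := gNa_ge mw ws i (i + 1)
  omega

-- ---- small facts ----

theorem pvSpaces_succ (n : Int) (h : 0 ≤ n) : pvSpaces n ++ " " = pvSpaces (n + 1) := by
  have : " " = String.ofList [' '] := rfl
  rw [this]
  unfold pvSpaces
  apply String.ext
  simp
  rw [← List.replicate_succ']
  congr 1
  omega

theorem kf_zero (ws : List String) : kf ws 0 = 0 := by simp [kf]

theorem kf_succ (ws : List String) (j : Nat) (h : j < ws.length) :
    kf ws (j + 1) = kf ws j + PySem.Str.len ws[j] + 1 := by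
  unfold kf
  have ht : ws.take (j + 1) = ws.take j ++ [ws[j]] := by
    rw [List.take_add_one, List.getElem?_eq_getElem h]
    rfl
  rw [ht]
  rw [List.map_append, List.sum_append]
  simp [PySem.Str.len_eq]
  ring

theorem len_nonneg (w : String) : 0 ≤ PySem.Str.len w := by
  rw [PySem.Str.len_eq]
  positivity

theorem kf_mono (ws : List String) (i j : Nat) (hij : i ≤ j) (hj : j ≤ ws.length) :
    kf ws i ≤ kf ws j := by
  induction j with
  | zero =>
    have : i = 0 := by omega
    subst this
    exact le_refl _
  | succ j ih =>
    rcases Nat.lt_or_ge i (j + 1) with h | h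
    · have h1 := ih (by omega) (by omega)
      have h2 := kf_succ ws j (by omega)
      have h3 := len_nonneg ws[j]
      omega
    · have h' : i = j + 1 := by omega
      subst h'
      exact le_refl _

-- ---- the key array holds kf ----

theorem keyB_getD (t : List String) : ∀ (k : Int) (j : Nat), j < t.length →
    (pvKeyB t k).getD j 0 = k + kf t (j + 1) := by
  induction t with
  | nil => intro k j h; simp at h
  | cons w t ih =>
    intro k j h
    cases j with
    | zero =>
      simp [pvKeyB, kf, PySem.Str.len_eq]
      ring
    | succ j =>
      have := ih (k + PySem.Str.len w + 1) j (by simpa using h)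
      simp only [pvKeyB, List.getD_cons_succ]
      rw [this]
      unfold kf
      simp [List.take_succ_cons, PySem.Str.len_eq]
      ring

theorem key_getD (ws : List String) (j : Nat) (h : j ≤ ws.length) :
    (0 :: pvKeyB ws 0).getD j 0 = kf ws j := by
  cases j with
  | zero => simp [kf]
  | succ j =>
    simp only [List.getD_cons_succ]
    rw [keyB_getD ws 0 j (by omega)]
    ring

-- ---- characterizing the greedy break gNa and the binary search ----

theorem gNa_le (mw : Int) (ws : List String) (i m : Nat) (h : m ≤ ws.length) :
    gNa mw ws i m ≤ ws.length := by
  fun_induction gNa mw ws i m with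
  | case1 m hm ih => exact ih (by omega)
  | case2 m hm => omega

theorem gNa_pred (mw : Int) (ws : List String) (i m : Nat) :
    gNa mw ws i m = m ∨ kf ws (gNa mw ws i m) ≤ kf ws i + mw + 1 := by
  fun_induction gNa mw ws i m with
  | case1 m hm ih =>
    rcases ih with h | h
    · right; rw [h]; exact hm.2
    · right; exact h
  | case2 m hm => left; rfl

theorem gNa_stop (mw : Int) (ws : List String) (i m : Nat)
    (h : gNa mw ws i m < ws.length) :
    ¬ kf ws (gNa mw ws i m + 1) ≤ kf ws i + mw + 1 := by
  fun_induction gNa mw ws i m with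
  | case1 m hm ih => exact ih h
  | case2 m hm =>
    intro hc
    exact hm ⟨h, hc⟩

theorem pvBSGo_ge (key : List Int) (bound : Int) :
    ∀ (fuel lo hi : Nat), lo ≤ pvBSGo key bound fuel lo hi := by
  intro fuel
  induction fuel with
  | zero => intro lo hi; exact le_refl _
  | succ fuel ih =>
    intro lo hi
    simp only [pvBSGo]
    split_ifs with h1 h2
    · have := ih ((lo + hi + 1) / 2) hi
      omega
    · exact ih lo ((lo + hi + 1) / 2 - 1)
    · exact le_refl _

theorem pvBS_ge (key : List Int) (bound : Int) (lo hi : Nat) : lo ≤ pvBS key bound lo hi :=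
  pvBSGo_ge key bound (hi - lo) lo hi

theorem pvBSGo_le (key : List Int) (bound : Int) :
    ∀ (fuel lo hi : Nat), lo ≤ hi → pvBSGo key bound fuel lo hi ≤ hi := by
  intro fuel
  induction fuel with
  | zero => intro lo hi h; exact h
  | succ fuel ih =>
    intro lo hi h
    simp only [pvBSGo]
    split_ifs with h1 h2
    · exact ih _ _ (by omega)
    · have := ih lo ((lo + hi + 1) / 2 - 1) (by omega)
      omega
    · exact h

theorem pvBS_le (key : List Int) (bound : Int) (lo hi : Nat) (h : lo ≤ hi) :
    pvBS key bound lo hi ≤ hi :=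
  pvBSGo_le key bound (hi - lo) lo hi h

theorem pvBSGo_char (ws : List String) (bound : Int) :
    ∀ (fuel lo hi lo0 : Nat), hi - lo ≤ fuel → lo0 ≤ lo → lo ≤ hi → hi ≤ ws.length →
    (lo = lo0 ∨ kf ws lo ≤ bound) →
    (hi < ws.length → ¬ kf ws (hi + 1) ≤ bound) →
    (pvBSGo (0 :: pvKeyB ws 0) bound fuel lo hi = lo0 ∨
        kf ws (pvBSGo (0 :: pvKeyB ws 0) bound fuel lo hi) ≤ bound) ∧
      (pvBSGo (0 :: pvKeyB ws 0) bound fuel lo hi < ws.length →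
        ¬ kf ws (pvBSGo (0 :: pvKeyB ws 0) bound fuel lo hi + 1) ≤ bound) := by
  intro fuel
  induction fuel with
  | zero =>
    intro lo hi lo0 hf h0 hlh hhn hpl hph
    have : lo = hi := by omega
    subst this
    exact ⟨hpl, hph⟩
  | succ fuel ih =>
    intro lo hi lo0 hf h0 hlh hhn hpl hph
    simp only [pvBSGo]
    split_ifs with h1 h2
    · refine ih _ _ lo0 (by omega) (by omega) (by omega) hhn ?_ hph
      right
      rw [← key_getD ws ((lo + hi + 1) / 2) (by omega)]
      exact h2
    · refine ih _ _ lo0 (by omega) h0 (by omega) (by omega) hpl ?_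
      intro hmn
      have hmeq : (lo + hi + 1) / 2 - 1 + 1 = (lo + hi + 1) / 2 := by omega
      rw [hmeq]
      rw [← key_getD ws ((lo + hi + 1) / 2) (by omega)]
      exact h2
    · have : lo = hi := by omega
      subst this
      exact ⟨hpl, hph⟩

theorem pvBS_char (ws : List String) (bound : Int) (lo hi lo0 : Nat) :
    lo0 ≤ lo → lo ≤ hi → hi ≤ ws.length →
    (lo = lo0 ∨ kf ws lo ≤ bound) →
    (hi < ws.length → ¬ kf ws (hi + 1) ≤ bound) →
    (pvBS (0 :: pvKeyB ws 0) bound lo hi = lo0 ∨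
        kf ws (pvBS (0 :: pvKeyB ws 0) bound lo hi) ≤ bound) ∧
      (pvBS (0 :: pvKeyB ws 0) bound lo hi < ws.length →
        ¬ kf ws (pvBS (0 :: pvKeyB ws 0) bound lo hi + 1) ≤ bound) := by
  intro h0 hlh hhn hpl hph
  exact pvBSGo_char ws bound (hi - lo) lo hi lo0 (le_refl _) h0 hlh hhn hpl hph


-- the binary-searched break equals the greedy break
theorem bs_eq_gNa (mw : Int) (ws : List String) (i : Nat) (hi : i < ws.length) :
    pvBS (0 :: pvKeyB ws 0) (kf ws i + mw + 1) (i + 1) ws.length = gNa mw ws i (i + 1) := by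
  set bound := kf ws i + mw + 1 with hb
  set r := pvBS (0 :: pvKeyB ws 0) bound (i + 1) ws.length with hr
  set g := gNa mw ws i (i + 1) with hg
  have hr1 : i + 1 ≤ r := pvBS_ge _ _ _ _
  have hr2 : r ≤ ws.length := pvBS_le _ _ _ _ (by omega)
  have hchar := pvBS_char ws bound (i + 1) ws.length (i + 1) (le_refl _) (by omega)
    (le_refl _) (Or.inl rfl) (fun h => absurd h (lt_irrefl _))
  rw [← hr] at hchar
  have hg1 : i + 1 ≤ g := gNa_ge _ _ _ _
  have hg2 : g ≤ ws.length := gNa_le _ _ _ _ (by omega)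
  have hg3 := gNa_pred mw ws i (i + 1)
  rw [← hg] at hg3
  rcases Nat.lt_trichotomy r g with hlt | heq | hgt
  · exfalso
    have hpg : kf ws g ≤ bound := by
      rcases hg3 with h | h
      · omega
      · exact h
    have hstop := hchar.2 (by omega)
    have hmono := kf_mono ws (r + 1) g (by omega) hg2
    omega
  · exact heq
  · exfalso
    have hpr : kf ws r ≤ bound := by
      rcases hchar.1 with h | h
      · omega
      · exact h
    have hstop := gNa_stop mw ws i (i + 1) (by rw [← hg]; omega)
    rw [← hg] at hstop
    have hmono := kf_mono ws (g + 1) r (by omega) hr2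
    omega

-- ---- B's loop produces linesFrom ----

theorem runGo_eq_linesFrom (mw : Int) (ws : List String) :
    ∀ (fuel i : Nat) (out : List String), i ≤ ws.length → ws.length - i ≤ fuel →
    pvRunGo mw ws (0 :: pvKeyB ws 0) ws.length fuel i out = out ++ linesFrom mw ws i := by
  intro fuel
  induction fuel with
  | zero =>
    intro i out hin hf
    have : i = ws.length := by omega
    subst this
    rw [pvRunGo, linesFrom, dif_neg (lt_irrefl _)]
    simp
  | succ fuel ih =>
    intro i out hin hf
    simp only [pvRunGo]
    by_cases h : i < ws.length
    · rw [if_pos h]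
      set jj := pvBS (0 :: pvKeyB ws 0) ((0 :: pvKeyB ws 0).getD i 0 + mw + 1) (i + 1) ws.length with hjdef
      have hkey : (0 :: pvKeyB ws 0).getD i 0 = kf ws i := key_getD ws i (by omega)
      have hj0 : jj = gNa mw ws i (i + 1) := by rw [hjdef, hkey, bs_eq_gNa mw ws i h]
      have hg1 : i + 1 ≤ jj := by rw [hj0]; exact gNa_ge mw ws i (i + 1)
      have hg2 : jj ≤ ws.length := by rw [hj0]; exact gNa_le mw ws i (i + 1) (by omega)
      rw [ih jj _ hg2 (by omega)]
      conv_rhs => rw [linesFrom]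
      rw [dif_pos h, ← hj0]
      rw [List.append_assoc, List.singleton_append]
      congr 2
      rw [lineStr]
      rw [PySem.List.slice_natCast]
      rw [key_getD ws i (by omega), key_getD ws jj (by omega)]
    · rw [if_neg h]
      rw [linesFrom, dif_neg h]
      simp

-- ---- the per-line string equality (A's generator line = B's divmod gap line) ----

-- the gap strings of _join_sentence in direct (non-accumulator) form
def pvSimple (reg ext : Int) : List String → Nat → List String
  | [], _ => []
  | w :: t, i => w :: pvGapA reg ext i :: pvSimple reg ext t (i + 1)

theorem pvLoopJ_eq (reg ext : Int) (t : List String) : ∀ (res : List String) (i : Nat),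
    pvLoopJ reg ext t res i = res ++ pvSimple reg ext t i := by
  induction t with
  | nil => intro res i; simp [pvLoopJ, pvSimple]
  | cons w t ih => intro res i; simp [pvLoopJ, pvSimple, ih]

-- res with its last gap popped
def pvCore (reg ext : Int) : List String → Nat → List String
  | [], _ => []
  | [w], _ => [w]
  | w :: x :: t, i => w :: pvGapA reg ext i :: pvCore reg ext (x :: t) (i + 1)

theorem pvSimple_dropLast (reg ext : Int) (t : List String) : ∀ (w : String) (i : Nat),
    (pvSimple reg ext (w :: t) i).dropLast = pvCore reg ext (w :: t) i := by
  induction t with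
  | nil => intro w i; simp [pvSimple, pvCore]
  | cons x t ih =>
    intro w i
    show (w :: pvGapA reg ext i :: pvSimple reg ext (x :: t) (i + 1)).dropLast = _
    rw [List.dropLast_cons_of_ne_nil (by simp [pvSimple]), List.dropLast_cons_of_ne_nil (by simp [pvSimple])]
    rw [ih x (i + 1)]
    rfl

-- the gap-interleaved tail
def pvTail (reg ext : Int) : List String → Nat → List String
  | [], _ => []
  | w :: t, i => pvGapA reg ext i :: w :: pvTail reg ext t (i + 1)

theorem pvCore_eq_tail (reg ext : Int) (t : List String) : ∀ (w : String) (i : Nat),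
    pvCore reg ext (w :: t) i = w :: pvTail reg ext t i := by
  induction t with
  | nil => intro w i; rfl
  | cons x t ih => intro w i; show _ :: _ :: pvCore reg ext (x :: t) (i + 1) = _; rw [ih]; rfl

-- one generator gap equals B's arithmetical gap
theorem gapA_eq (reg ext : Int) (hreg : 0 ≤ reg) (k : Nat) :
    pvGapA reg ext k = pvSpaces (reg + if (k : Int) < ext then (1 : Int) else 0) := by
  by_cases hk : (k : Int) < ext
  · rw [pvGapA, if_pos hk, if_pos hk]
    exact pvSpaces_succ reg hreg
  · rw [pvGapA, if_neg hk, if_neg hk]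
    simp

-- ''.join over a cons (separator is empty)
theorem strJoinNilCons (a : String) (l : List String) :
    PySem.Str.join "" (a :: l) = a ++ PySem.Str.join "" l := by
  cases l with
  | nil =>
    apply String.toList_inj.mp
    simp [PySem.Str.toList_join, PySem.Chars.join_singleton, PySem.Chars.join_nil]
  | cons b r =>
    apply String.toList_inj.mp
    simp [PySem.Str.toList_join, PySem.Chars.join_cons_cons]

theorem tail_eq_enum (reg ext : Int) (hreg : 0 ≤ reg) (t : List String) :
    ∀ (w x : String) (k : Nat),
    PySem.Str.join "" (w :: pvTail reg ext (x :: t) k) =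
      PySem.Str.join "" ((PySem.List.enumerate ((w :: x :: t).dropLast) (k : Int)).map
        (fun p => p.2 ++ pvSpaces (reg + if p.1 < ext then (1 : Int) else 0)))
        ++ ((w :: x :: t).getLast?.getD "") := by
  induction t with
  | nil =>
    intro w x k
    show PySem.Str.join "" [w, pvGapA reg ext k, x] = _
    rw [strJoinNilCons, strJoinNilCons]
    simp [PySem.List.enumerate_cons, PySem.List.enumerate_nil]
    rw [strJoinNilCons]
    rw [gapA_eq reg ext hreg k]
    apply String.toList_inj.mp
    simp [PySem.Str.toList_join, PySem.Chars.join_nil]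
  | cons y t' ih =>
    intro w x k
    show PySem.Str.join "" (w :: pvGapA reg ext k :: x :: pvTail reg ext (y :: t') (k + 1)) = _
    rw [strJoinNilCons, strJoinNilCons]
    have hih := ih x y (k + 1)
    push_cast at hih
    rw [hih]
    have hdl : (w :: x :: y :: t').dropLast = w :: (x :: y :: t').dropLast := by
      rw [List.dropLast_cons_of_ne_nil (by simp)]
    rw [hdl, PySem.List.enumerate_cons, List.map_cons, strJoinNilCons]
    rw [gapA_eq reg ext hreg k]
    have hgl : (w :: x :: y :: t').getLast?.getD "" = (x :: y :: t').getLast?.getD "" := by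
      simp [List.getLast?_cons_cons]
    rw [hgl]
    apply String.toList_inj.mp
    simp [String.toList_append]

theorem joinA_eq_lineB (line : List String) (s : Int) (h2 : 2 ≤ line.length) (hs : 0 ≤ s) :
    pvJoinSentenceA line s =
      PySem.Str.join ""
        ((PySem.List.enumerate line.dropLast).map
          (fun p => p.2 ++ pvSpaces (PySem.Int.floordiv s ((line.length : Int) - 1) +
            (if p.1 < PySem.Int.mod s ((line.length : Int) - 1) then (1 : Int) else 0))))
        ++ (line.getLast?.getD "") := by
  match line, h2 with
  | w :: x :: t, _ =>
    have hlen : (w :: x :: t).length = t.length + 2 := by simp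
    have hn1 : ((w :: x :: t).length : Int) - 1 = (t.length : Int) + 1 := by push_cast [hlen]; ring
    have hpos : (0 : Int) < (t.length : Int) + 1 := by positivity
    set n1 : Int := (t.length : Int) + 1 with hn1def
    set reg := PySem.Int.floordiv s n1 with hregdef
    set ext := PySem.Int.mod s n1 with hextdef
    have hreg : 0 ≤ reg := by
      rw [hregdef]
      exact (PySem.Int.le_floordiv_iff_mul_le hpos).mpr (by simpa using hs)
    have hA : pvJoinSentenceA (w :: x :: t) s =
        PySem.Str.join "" ((pvLoopJ reg ext (w :: x :: t) [] 0).dropLast) := by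
      rw [pvJoinSentenceA]
      rw [if_neg (by rw [hn1]; omega)]
      rw [hn1]
    rw [hA, pvLoopJ_eq, List.nil_append, pvSimple_dropLast, pvCore_eq_tail]
    rw [tail_eq_enum reg ext hreg t w x 0]
    rw [hn1]
    norm_num
    rw [hregdef, hextdef]

-- ---- A's loop produces linesFrom ----

theorem loopA_eq (mw : Int) (ws : List String) :
    ∀ (d i m : Nat) (out : List String), ws.length - m = d → m ≤ ws.length → i < m →
    (m = i + 1 ∨ kf ws m ≤ kf ws i + mw + 1) →
    pvFinishA mw (pvLoopA mw (ws.drop m) ((ws.drop i).take (m - i))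
        (kf ws m - kf ws i - ((m : Int) - (i : Int))) out)
      = out ++ lineStr mw ws i (gNa mw ws i m) :: linesFrom mw ws (gNa mw ws i m) := by
  intro d
  induction d with
  | zero =>
    intro i m out hd hm him hinv
    have hmeq : m = ws.length := by omega
    subst hmeq
    rw [List.drop_length, pvLoopA]
    have hne : (ws.drop i).take (ws.length - i) ≠ [] := by
      apply List.ne_nil_of_length_pos
      simp
      omega
    show pvFinishA mw (_, _, out) = _
    rw [pvFinishA]
    rw [if_neg hne]
    rw [gNa, if_neg (by intro hcon; exact absurd hcon.1 (lt_irrefl _))]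
    rw [linesFrom, dif_neg (lt_irrefl _)]
    rw [lineStr, if_pos rfl]
  | succ d ih =>
    intro i m out hd hm him hinv
    have hmlt : m < ws.length := by omega
    have hks := kf_succ ws m hmlt
    have hcurlen : ((ws.drop i).take (m - i)).length = m - i := by
      simp
      omega
    rw [List.drop_eq_getElem_cons hmlt]
    simp only [pvLoopA]
    rw [hcurlen]
    by_cases hc : kf ws (m + 1) ≤ kf ws i + mw + 1
    · rw [if_pos (by omega)]
      have hcur : (ws.drop i).take (m - i) ++ [ws[m]] = (ws.drop i).take (m + 1 - i) := by
        have h1 : m + 1 - i = (m - i) + 1 := by omega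
        rw [h1, List.take_add_one]
        congr
        rw [List.getElem?_drop]
        rw [List.getElem?_eq_getElem (by omega : i + (m - i) < ws.length)]
        simp
        congr 1
        omega
      rw [hcur]
      have hlet : kf ws m - kf ws i - ((m : Int) - (i : Int)) + PySem.Str.len ws[m]
          = kf ws (m + 1) - kf ws i - (((m + 1 : Nat) : Int) - (i : Int)) := by
        push_cast
        omega
      rw [hlet]
      rw [show gNa mw ws i m = gNa mw ws i (m + 1) from by rw [gNa, if_pos ⟨hmlt, hc⟩]]
      exact ih i (m + 1) out (by omega) (by omega) (by omega) (Or.inr hc)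
    · rw [if_neg (by omega)]
      have h1 : [ws[m]] = (ws.drop m).take (m + 1 - m) := by
        rw [List.drop_eq_getElem_cons hmlt]
        have : m + 1 - m = 1 := by omega
        rw [this]
        rfl
      have h2 : PySem.Str.len ws[m] = kf ws (m + 1) - kf ws m - (((m + 1 : Nat) : Int) - (m : Int)) := by
        push_cast
        omega
      rw [h1, h2]
      rw [show (ws.drop (m + 1)) = ws.drop (m + 1) from rfl]
      rw [ih m (m + 1) (out ++ [pvJoinSentenceA ((ws.drop i).take (m - i))
            (mw - (kf ws m - kf ws i - ((m : Int) - (i : Int))))]) (by omega) (by omega) (by omega) (Or.inl rfl)]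
      rw [show gNa mw ws i m = m from by rw [gNa, if_neg (by intro hcon; exact hc hcon.2)]]
      conv_rhs => rw [linesFrom]
      rw [dif_pos hmlt]
      rw [List.append_assoc, List.singleton_append]
      congr 2
      -- the emitted line: A's _join_sentence equals lineStr
      rw [lineStr, if_neg (by omega)]
      by_cases hm1 : m = i + 1
      · rw [if_pos hm1]
        subst hm1
        have hone : (ws.drop i).take (i + 1 - i) = [ws[i]] := by
          rw [List.drop_eq_getElem_cons (by omega : i < ws.length)]
          have : i + 1 - i = 1 := by omega
          rw [this]
          rfl
        have : i + 1 - i = 1 := by omega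
        rw [this] at hone ⊢
        rw [hone]
        rw [pvJoinSentenceA]
        rw [if_pos (by simp)]
        have hlet1 : kf ws (i + 1) - kf ws i - (((i + 1 : Nat) : Int) - (i : Int)) = PySem.Str.len ws[i] := by
          have := kf_succ ws i (by omega)
          push_cast
          omega
        push_cast
        rw [show kf ws (i + 1) - kf ws i - ((i : Int) + 1 - (i : Int)) = PySem.Str.len ws[i] from by push_cast at hlet1; omega]
        simp
      · rw [if_neg hm1]
        have hpredm : kf ws m ≤ kf ws i + mw + 1 := by
          rcases hinv with h | h
          · exact absurd h hm1
          · exact h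
        have hlen2 : 2 ≤ ((ws.drop i).take (m - i)).length := by
          rw [hcurlen]
          omega
        have hs0 : 0 ≤ mw - (kf ws m - kf ws i - ((m : Int) - (i : Int))) := by
          have : (1 : Int) ≤ (m : Int) - (i : Int) - 1 := by omega
          omega
        rw [joinA_eq_lineB _ _ hlen2 hs0]
        rw [hcurlen]
        have hcast : (((m - i : Nat)) : Int) - 1 = (m : Int) - (i : Int) - 1 := by omega
        rw [hcast]

-- ===== VERDICT (by name: the statement is the Claim_ definition above) =====
theorem yield_words_spec : Claim_equal_yield_words := by
  intro words mw _ hpre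
  unfold Spec_yield_words
  match words with
  | [] => rfl
  | w :: ws =>
    have hw : PySem.Str.len w ≤ mw := by
      rcases hpre with h | h
      · exact absurd h (by simp)
      · simpa using h
    show pvFinishA mw (pvLoopA mw (w :: ws) [] 0 []) = pvRunGo mw (w :: ws) _ (w :: ws).length (w :: ws).length 0 []
    rw [runGo_eq_linesFrom mw (w :: ws) (w :: ws).length 0 [] (by omega) (by omega)]
    rw [pvLoopA]
    simp only [List.length_nil, Nat.cast_zero, Int.add_zero, Int.zero_add]
    rw [if_pos (by simpa using hw)]
    have hm := loopA_eq mw (w :: ws) ((w :: ws).length - 1) 0 1 [] rfl (by simp) (by omega) (Or.inl rfl)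
    have h1 : (w :: ws).drop 1 = ws := rfl
    have h2 : ((w :: ws).drop 0).take 1 = [w] := rfl
    rw [h1, h2] at hm
    norm_num at hm ⊢
    have h3 : kf (w :: ws) 1 = (w.length : Int) + 1 := by
      simp [kf, PySem.Str.len_eq]
    rw [h3, kf_zero] at hm
    norm_num at hm
    rw [hm]
    conv_rhs => rw [linesFrom]
    rw [dif_pos (by simp : 0 < (w :: ws).length)]
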